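-- pv_equiv track=rewrite | github.com/CodingEZ/Scrabble-AI | humanChecker.py | getAllCombos
-- ===== SOURCE A (Python) =====
-- def letterLeftRight(spot, occupied):
--     ''' Checks if there is a letter to the left or right '''
--     column = spot%15
--     if column != 0:
--         if (spot-1) in occupied:
--             return True
--     if column != 14:
--         if (spot+1) in occupied:
--             return True
--     return False
--
-- def letterUpDown(spot, occupied):
--     ''' Checks if there is a letter up or down '''
--     row = spot//15
--     if row != 0:
--         if (spot-15) in occupied:
--             return True
--     if row != 14:
--         if (spot+15) in occupied:
--             return True
--     return False
--
-- def getMainCombo(isRowCombo, occupied, situation):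
--     ''' Get the spots that correspond to the main combo in order '''
--     spot = situation[0]
--     locations = [spot]
--     locator = spot
--     if isRowCombo:
--         while (((locator + 1) in occupied) or ((locator + 1) in situation)) and (locator%15 != 14):
--             locator += 1
--             locations.append(locator)
--         locator = spot      # resets the locator to the original position
--         while (((locator - 1) in occupied) or ((locator - 1) in situation)) and (locator%15 != 0):
--             locator -= 1
--             locations.append(locator)
--     else:
--         while ((locator + 15) in occupied) or ((locator + 15) in situation):
--             locator += 15
--             locations.append(locator)
--         locator = spot      # resets the locator to the original position
--         while ((locator - 15) in occupied) or ((locator - 15) in situation):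
--             locator -= 15
--             locations.append(locator)
--     return sorted(locations)
--
-- def getSideCombo(isRowCombo, spot, occupied):
--     ''' Get the spots that correspond to the side combo in order '''
--     locations = [spot]
--     locator = spot
--     if isRowCombo:
--         while (locator + 15) in occupied:
--             locator += 15
--             locations.append(locator)
--         locator = spot
--         while (locator - 15) in occupied:
--             locator -= 15
--             locations.append(locator)
--     else:
--         while ((locator + 1) in occupied) and (locator%15 != 14):
--             locator += 1
--             locations.append(locator)
--         locator = spot
--         while ((locator - 1) in occupied) and (locator%15 != 0):
--             locator -= 1
--             locations.append(locator)
--     return sorted(locations)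
--
-- def getAllCombos(situation, occupied, isRowCombo):
--     ''' Gets combos of letters made by a valid placement for a computer '''
--     combosMade = []
--     mainCombo = getMainCombo(isRowCombo, occupied, situation)
--     if len(mainCombo) != 1:
--         combosMade.append(mainCombo)
--     # take note, the main combo comes first
--     for spot in situation:
--         if (isRowCombo) and (letterUpDown(spot, occupied)):
--             # checks if it is a row combo and if there exists a side combo
--             combosMade.append(getSideCombo(isRowCombo, spot, occupied))
--         if (not isRowCombo) and (letterLeftRight(spot, occupied)):
--             # checks if it is a row combo and if there exists a side combo
--             combosMade.append(getSideCombo(isRowCombo, spot, occupied))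
--     if len(combosMade) == 0:
--         combosMade.append(mainCombo)    # for situations where a single letter is played by itself (for avoiding errors)
--     return combosMade   # now all of these combos must be checked in the dictionary
-- ===== SOURCE B (Python) =====
-- def _chain(prev, xs, delta):
--     ''' Longest prefix of xs advancing by delta from prev '''
--     out = []
--     for x in xs:
--         if x != prev + delta:
--             break
--         out.append(x)
--         prev = x
--     return out
--
-- def _axisCells(spot, cells, horizontal):
--     ''' The cells of spot's full row (horizontal) or column that are present '''
--     if horizontal:
--         base = spot // 15 * 15
--         return {x for x in cells if base <= x < base + 15}
--     return {x for x in cells if (x - spot) % 15 == 0}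
--
-- def _axisCombo(spot, present, step):
--     ''' Maximal contiguous run of present cells through spot, in order '''
--     above = sorted(x for x in present if x > spot)
--     below = sorted((x for x in present if x < spot), reverse=True)
--     left = _chain(spot, below, -step)
--     left.reverse()
--     return left + [spot] + _chain(spot, above, step)
--
-- def _hasNeighbor(spot, occupied, vertical):
--     ''' Whether an occupied cell adjoins spot along the given axis '''
--     step = 15 if vertical else 1
--     pos = spot // 15 if vertical else spot % 15
--     return (pos != 0 and spot - step in occupied) or (pos != 14 and spot + step in occupied)
--
-- def getAllCombos(situation, occupied, isRowCombo):
--     ''' Gets combos of letters made by a valid placement for a computer '''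
--     spot0 = situation[0]
--     occ = set(occupied)
--     pool = occ | set(situation)
--     main = _axisCombo(spot0, _axisCells(spot0, pool, isRowCombo), 1 if isRowCombo else 15)
--     combos = [main] if len(main) != 1 else []
--     for spot in situation:
--         if _hasNeighbor(spot, occ, isRowCombo):
--             combos.append(_axisCombo(spot, _axisCells(spot, occ, not isRowCombo), 15 if isRowCombo else 1))
--     if not combos:
--         combos.append(main)
--     return combos
-- ===== Notes on version B (the rewrite author's own statement) =====
-- stated objective: alternative
-- what changed: The outward +1/-1 and +15/-15 membership-walk loops of getMainCombo/getSideCombo are replaced by a scan-line pass: filter the placement's row/column cells into a set, sort them above/below the start spot, and take the longest step-consecutive prefix on each side.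
import Mathlib
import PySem

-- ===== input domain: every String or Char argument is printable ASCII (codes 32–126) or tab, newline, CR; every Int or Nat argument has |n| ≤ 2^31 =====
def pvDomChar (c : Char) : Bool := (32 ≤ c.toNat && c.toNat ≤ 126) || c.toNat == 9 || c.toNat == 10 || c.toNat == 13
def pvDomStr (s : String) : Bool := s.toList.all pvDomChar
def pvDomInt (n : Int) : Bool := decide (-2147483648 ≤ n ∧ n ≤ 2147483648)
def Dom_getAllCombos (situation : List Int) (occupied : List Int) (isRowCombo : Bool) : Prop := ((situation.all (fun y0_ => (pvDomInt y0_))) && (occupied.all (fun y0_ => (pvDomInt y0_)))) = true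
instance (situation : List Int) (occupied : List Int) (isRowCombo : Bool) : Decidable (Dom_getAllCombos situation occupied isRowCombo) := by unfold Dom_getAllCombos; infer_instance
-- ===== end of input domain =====

-- B replaces A's outward membership-walk loops by a sort-then-scan of the row/column cells; objective: alternative (not faster).

-- ===== PORT A =====
-- generic fueled transliteration of A's outward 'while cond(locator): locator += step; locations.append(locator)' loops;
-- the fuel passed by the callers always dominates the number of iterations (each step visits a fresh member of the lists)
def pvWalk (cond : Int → Bool) (step : Int) : Int → Nat → List Int
  | _, 0 => []
  | loc, fuel+1 => if cond loc then (loc + step) :: pvWalk cond step (loc + step) fuel else []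

def letterLeftRight (spot : Int) (occupied : List Int) : Bool :=
  let column := PySem.Int.mod spot 15
  if column != 0 && decide ((spot - 1) ∈ occupied) then true
  else if column != 14 && decide ((spot + 1) ∈ occupied) then true
  else false

def letterUpDown (spot : Int) (occupied : List Int) : Bool :=
  let row := PySem.Int.floordiv spot 15
  if row != 0 && decide ((spot - 15) ∈ occupied) then true
  else if row != 14 && decide ((spot + 15) ∈ occupied) then true
  else false

def getMainCombo (isRowCombo : Bool) (occupied : List Int) (situation : List Int) : List Int :=
  let spot := situation.headD 0      -- situation[0]; Pre_ excludes the empty list, where Python raises IndexError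
  let fuel := occupied.length + situation.length + 1
  let locations :=
    if isRowCombo then
      spot :: (pvWalk (fun loc => (decide ((loc + 1) ∈ occupied) || decide ((loc + 1) ∈ situation)) && (PySem.Int.mod loc 15 != 14)) 1 spot fuel ++
               pvWalk (fun loc => (decide ((loc - 1) ∈ occupied) || decide ((loc - 1) ∈ situation)) && (PySem.Int.mod loc 15 != 0)) (-1) spot fuel)
    else
      spot :: (pvWalk (fun loc => decide ((loc + 15) ∈ occupied) || decide ((loc + 15) ∈ situation)) 15 spot fuel ++
               pvWalk (fun loc => decide ((loc - 15) ∈ occupied) || decide ((loc - 15) ∈ situation)) (-15) spot fuel)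
  PySem.List.sorted locations (fun x => x)

def getSideCombo (isRowCombo : Bool) (spot : Int) (occupied : List Int) : List Int :=
  let fuel := occupied.length + 1
  let locations :=
    if isRowCombo then
      spot :: (pvWalk (fun loc => decide ((loc + 15) ∈ occupied)) 15 spot fuel ++
               pvWalk (fun loc => decide ((loc - 15) ∈ occupied)) (-15) spot fuel)
    else
      spot :: (pvWalk (fun loc => decide ((loc + 1) ∈ occupied) && (PySem.Int.mod loc 15 != 14)) 1 spot fuel ++
               pvWalk (fun loc => decide ((loc - 1) ∈ occupied) && (PySem.Int.mod loc 15 != 0)) (-1) spot fuel)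
  PySem.List.sorted locations (fun x => x)

def getAllCombos (situation : List Int) (occupied : List Int) (isRowCombo : Bool) : List (List Int) :=
  let mainCombo := getMainCombo isRowCombo occupied situation
  let combosMade : List (List Int) := if mainCombo.length != 1 then [mainCombo] else []
  let combosMade := situation.foldl (fun acc spot =>
    let acc := if isRowCombo && letterUpDown spot occupied then acc ++ [getSideCombo isRowCombo spot occupied] else acc
    if !isRowCombo && letterLeftRight spot occupied then acc ++ [getSideCombo isRowCombo spot occupied] else acc) combosMade
  if combosMade.length == 0 then combosMade ++ [mainCombo] else combosMade

-- ===== PORT B =====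
def pvChain (delta : Int) : Int → List Int → List Int
  | _, [] => []
  | prev, x :: xs => if x == prev + delta then x :: pvChain delta x xs else []

def pvAxisCells (spot : Int) (cells : List Int) (horizontal : Bool) : PySem.Set Int :=
  if horizontal then
    let base := PySem.Int.floordiv spot 15 * 15
    PySem.Set.ofList (cells.filter (fun x => decide (base ≤ x) && decide (x < base + 15)))
  else
    PySem.Set.ofList (cells.filter (fun x => PySem.Int.mod (x - spot) 15 == 0))

def pvAxisCombo (spot : Int) (present : List Int) (step : Int) : List Int :=
  let above := PySem.List.sorted (present.filter (fun x => decide (x > spot))) (fun x => x)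
  let below := PySem.List.sorted (present.filter (fun x => decide (x < spot))) (fun x => x) true
  let left := (pvChain (-step) spot below).reverse
  left ++ [spot] ++ pvChain step spot above

def pvHasNeighbor (spot : Int) (occupied : List Int) (vertical : Bool) : Bool :=
  let step : Int := if vertical then 15 else 1
  let pos := if vertical then PySem.Int.floordiv spot 15 else PySem.Int.mod spot 15
  (pos != 0 && decide ((spot - step) ∈ occupied)) || (pos != 14 && decide ((spot + step) ∈ occupied))

def getAllCombos_alt (situation : List Int) (occupied : List Int) (isRowCombo : Bool) : List (List Int) :=
  let spot0 := situation.headD 0     -- situation[0]; Pre_ excludes the empty list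
  let occ := PySem.Set.ofList occupied
  let pool := occ.union (PySem.Set.ofList situation)
  let main := pvAxisCombo spot0 (pvAxisCells spot0 pool isRowCombo) (if isRowCombo then 1 else 15)
  let combos : List (List Int) := if main.length != 1 then [main] else []
  let combos := situation.foldl (fun acc spot =>
    if pvHasNeighbor spot occ isRowCombo then
      acc ++ [pvAxisCombo spot (pvAxisCells spot occ (!isRowCombo)) (if isRowCombo then 15 else 1)]
    else acc) combos
  if combos.length == 0 then combos ++ [main] else combos

-- ===== PRECONDITION & SPEC =====
-- Pre_ excludes only the empty situation, where Python's situation[0] raises IndexError.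
def Pre_getAllCombos (situation : List Int) (occupied : List Int) (isRowCombo : Bool) : Prop := situation ≠ []
instance (situation : List Int) (occupied : List Int) (isRowCombo : Bool) : Decidable (Pre_getAllCombos situation occupied isRowCombo) := by unfold Pre_getAllCombos; infer_instance
def pvWitness_getAllCombos : List Int × List Int × Bool := ([3, 4], [5, 19], true)

def Spec_getAllCombos (situation : List Int) (occupied : List Int) (isRowCombo : Bool) (out : List (List Int)) : Prop := out = getAllCombos_alt situation occupied isRowCombo
instance (situation : List Int) (occupied : List Int) (isRowCombo : Bool) (out : List (List Int)) : Decidable (Spec_getAllCombos situation occupied isRowCombo out) := by unfold Spec_getAllCombos; infer_instance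

-- ===== CLAIM (what is proved, stated in full; the proofs are below) =====
def Claim_equal_getAllCombos : Prop := ∀ (situation : List Int) (occupied : List Int) (isRowCombo : Bool), Dom_getAllCombos situation occupied isRowCombo → Pre_getAllCombos situation occupied isRowCombo → Spec_getAllCombos situation occupied isRowCombo (getAllCombos situation occupied isRowCombo)

-- ===== LEMMAS AND PROOFS =====

lemma pvLen_foldl_add (t : List Int) : ∀ s : List Int, (List.foldl PySem.Set.add s t).length ≤ s.length + t.length := by
  induction t with
  | nil => intro s; simp
  | cons x t ih =>
    intro s
    have h1 : (PySem.Set.add s x).length ≤ s.length + 1 := by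
      unfold PySem.Set.add; split <;> simp
    calc (List.foldl PySem.Set.add s (x :: t)).length
        = (List.foldl PySem.Set.add (PySem.Set.add s x) t).length := by simp
      _ ≤ (PySem.Set.add s x).length + t.length := ih _
      _ ≤ s.length + (x :: t).length := by simp; omega

lemma pvWalk_shape (c : Int → Bool) (s : Int) :
    ∀ (fuel : Nat) (loc : Int), ∃ n : Nat,
      pvWalk c s loc fuel = (List.range n).map (fun (k : Nat) => loc + s * ((k : Int) + 1)) := by
  intro fuel
  induction fuel with
  | zero => intro loc; exact ⟨0, by simp [pvWalk]⟩
  | succ f ih =>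
    intro loc
    by_cases h : c loc = true
    · obtain ⟨n, hn⟩ := ih (loc + s)
      refine ⟨n + 1, ?_⟩
      simp only [pvWalk, h, if_pos, hn, List.range_succ_eq_map, List.map_cons, List.map_map]
      refine List.cons_eq_cons.mpr ⟨by push_cast; ring, ?_⟩
      apply List.map_congr_left
      intro k _
      simp only [Function.comp_apply]
      push_cast; ring
    · exact ⟨0, by simp [pvWalk, h]⟩

lemma pvWalk_congr_inv (c₁ c₂ : Int → Bool) (s : Int) (Inv : Int → Prop)
    (hstep : ∀ loc, Inv loc → c₁ loc = true → Inv (loc + s))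
    (hcond : ∀ loc, Inv loc → c₁ loc = c₂ loc) :
    ∀ (fuel : Nat) (loc : Int), Inv loc → pvWalk c₁ s loc fuel = pvWalk c₂ s loc fuel := by
  intro fuel
  induction fuel with
  | zero => intro loc _; rfl
  | succ f ih =>
    intro loc hInv
    simp only [pvWalk, ← hcond loc hInv]
    by_cases h : c₁ loc = true
    · simp only [h, if_pos]
      rw [ih (loc + s) (hstep loc hInv h)]
    · simp [h]

lemma pvChain_up (mQ : Int → Bool) (s : Int) (hs : 0 < s) :
    ∀ (ys : List Int) (prev : Int) (fuel : Nat),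
      ys.length < fuel →
      List.Pairwise (· < ·) ys →
      (∀ x, x ∈ ys ↔ (mQ x = true ∧ prev < x)) →
      (∀ x, mQ x = true → s ∣ (x - prev)) →
      pvChain s prev ys = pvWalk (fun loc => mQ (loc + s)) s prev fuel := by
  intro ys
  induction ys with
  | nil =>
    intro prev fuel hfuel _ hmem _
    obtain ⟨f, rfl⟩ : ∃ f, fuel = f + 1 := ⟨fuel - 1, by omega⟩
    have hq : mQ (prev + s) = false := by
      by_contra h
      have : prev + s ∈ ([] : List Int) := (hmem _).mpr ⟨by simpa using h, by omega⟩
      simp at this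
    simp [pvChain, pvWalk, hq]
  | cons y t ih =>
    intro prev fuel hfuel hpw hmem hdvd
    obtain ⟨f, rfl⟩ : ∃ f, fuel = f + 1 := ⟨fuel - 1, by omega⟩
    have hy : mQ y = true ∧ prev < y := (hmem y).mp (List.mem_cons_self ..)
    have hyge : prev + s ≤ y := by
      have := Int.le_of_dvd (by omega) (hdvd y hy.1)
      omega
    by_cases hm : mQ (prev + s) = true
    · have hmemys : prev + s ∈ y :: t := (hmem _).mpr ⟨hm, by omega⟩
      have hyeq : y = prev + s := by
        rcases List.mem_cons.mp hmemys with h | h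
        · omega
        · have := (List.pairwise_cons.mp hpw).1 _ h
          omega
      subst hyeq
      simp only [pvChain, pvWalk, hm, if_pos, beq_self_eq_true]
      rw [ih (prev + s) f (by simpa using hfuel) (List.pairwise_cons.mp hpw).2]
      · intro x
        constructor
        · intro hx
          have hxy := (List.pairwise_cons.mp hpw).1 _ hx
          have := (hmem x).mp (List.mem_cons_of_mem _ hx)
          exact ⟨this.1, hxy⟩
        · rintro ⟨hqx, hlt⟩
          have hx : x ∈ (prev + s) :: t := (hmem x).mpr ⟨hqx, by omega⟩
          rcases List.mem_cons.mp hx with h | h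
          · omega
          · exact h
      · intro x hq
        have h1 := hdvd x hq
        have h2 : x - (prev + s) = (x - prev) - s := by ring
        rw [h2]
        exact dvd_sub h1 dvd_rfl
    · have hyne : (y == prev + s) = false := by
        apply beq_eq_false_iff_ne.mpr
        intro h; rw [h] at hy; exact hm hy.1
      simp [pvChain, pvWalk, hyne, hm]

lemma pvChain_down (mQ : Int → Bool) (s : Int) (hs : 0 < s) :
    ∀ (ys : List Int) (prev : Int) (fuel : Nat),
      ys.length < fuel →
      List.Pairwise (· > ·) ys →
      (∀ x, x ∈ ys ↔ (mQ x = true ∧ x < prev)) →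
      (∀ x, mQ x = true → s ∣ (x - prev)) →
      pvChain (-s) prev ys = pvWalk (fun loc => mQ (loc + -s)) (-s) prev fuel := by
  intro ys
  induction ys with
  | nil =>
    intro prev fuel hfuel _ hmem _
    obtain ⟨f, rfl⟩ : ∃ f, fuel = f + 1 := ⟨fuel - 1, by omega⟩
    have hq : mQ (prev + -s) = false := by
      by_contra h
      have : prev + -s ∈ ([] : List Int) := (hmem _).mpr ⟨by simpa using h, by omega⟩
      simp at this
    simp [pvChain, pvWalk, hq]
  | cons y t ih =>
    intro prev fuel hfuel hpw hmem hdvd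
    obtain ⟨f, rfl⟩ : ∃ f, fuel = f + 1 := ⟨fuel - 1, by omega⟩
    have hy : mQ y = true ∧ y < prev := (hmem y).mp (List.mem_cons_self ..)
    have hyge : y ≤ prev - s := by
      have h1 := (hdvd y hy.1).neg_right
      have := Int.le_of_dvd (by omega) h1
      omega
    by_cases hm : mQ (prev + -s) = true
    · have hmemys : prev + -s ∈ y :: t := (hmem _).mpr ⟨hm, by omega⟩
      have hyeq : y = prev + -s := by
        rcases List.mem_cons.mp hmemys with h | h
        · omega
        · have := (List.pairwise_cons.mp hpw).1 _ h
          simp only [gt_iff_lt] at this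
          omega
      subst hyeq
      simp only [pvChain, pvWalk, hm, if_pos, beq_self_eq_true]
      rw [ih (prev + -s) f (by simpa using hfuel) (List.pairwise_cons.mp hpw).2]
      · intro x
        constructor
        · intro hx
          have hxy := (List.pairwise_cons.mp hpw).1 _ hx
          have := (hmem x).mp (List.mem_cons_of_mem _ hx)
          exact ⟨this.1, hxy⟩
        · rintro ⟨hqx, hlt⟩
          have hx : x ∈ (prev + -s) :: t := (hmem x).mpr ⟨hqx, by omega⟩
          rcases List.mem_cons.mp hx with h | h
          · omega
          · exact h
      · intro x hq
        have h1 := hdvd x hq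
        have h2 : x - (prev + -s) = (x - prev) + s := by ring
        rw [h2]
        exact dvd_add h1 dvd_rfl
    · have hyne : (y == prev + -s) = false := by
        apply beq_eq_false_iff_ne.mpr
        intro h; rw [h] at hy; exact hm hy.1
      simp [pvChain, pvWalk, hyne, hm]


lemma pvAxisCombo_eq_sorted (mQ : Int → Bool) (present : List Int) (spot s : Int) (hs : 0 < s)
    (hnd : present.Nodup)
    (hmem : ∀ x, x ∈ present ↔ mQ x = true)
    (hlat : ∀ x, mQ x = true → s ∣ (x - spot))
    (fuel : Nat) (hfuel : present.length < fuel) :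
    pvAxisCombo spot present s =
      PySem.List.sorted (spot :: (pvWalk (fun loc => mQ (loc + s)) s spot fuel ++
        pvWalk (fun loc => mQ (loc + -s)) (-s) spot fuel)) (fun x => x) := by
  set U := pvWalk (fun loc => mQ (loc + s)) s spot fuel with hU
  set D := pvWalk (fun loc => mQ (loc + -s)) (-s) spot fuel with hD
  have habove : pvChain s spot (PySem.List.sorted (present.filter (fun x => decide (x > spot))) (fun x => x)) = U := by
    refine pvChain_up mQ s hs _ spot fuel ?_ ?_ ?_ ?_
    · rw [PySem.List.length_sorted]
      exact lt_of_le_of_lt (List.length_filter_le _ _) hfuel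
    · have h1 := PySem.List.sorted_pairwise (present.filter (fun x => decide (x > spot))) (fun x => x)
      have h2 : (PySem.List.sorted (present.filter (fun x => decide (x > spot))) (fun x => x)).Nodup :=
        (PySem.List.sorted_perm _ _ _).nodup_iff.mpr (hnd.filter _)
      exact (h1.and h2).imp (fun h => lt_of_le_of_ne h.1 h.2)
    · intro x
      rw [PySem.List.mem_sorted, List.mem_filter, hmem x]
      simp only [decide_eq_true_eq]
    · exact fun x hx => hlat x hx
  have hbelow : pvChain (-s) spot (PySem.List.sorted (present.filter (fun x => decide (x < spot))) (fun x => x) true) = D := by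
    refine pvChain_down mQ s hs _ spot fuel ?_ ?_ ?_ ?_
    · rw [PySem.List.length_sorted]
      exact lt_of_le_of_lt (List.length_filter_le _ _) hfuel
    · have h1 := PySem.List.sorted_pairwise_rev (present.filter (fun x => decide (x < spot))) (fun x => x)
      have h2 : (PySem.List.sorted (present.filter (fun x => decide (x < spot))) (fun x => x) true).Nodup :=
        (PySem.List.sorted_perm _ _ _).nodup_iff.mpr (hnd.filter _)
      exact (h1.and h2).imp (fun h => lt_of_le_of_ne h.1 (Ne.symm h.2))
    · intro x
      rw [PySem.List.mem_sorted, List.mem_filter, hmem x]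
      simp only [decide_eq_true_eq]
    · exact fun x hx => hlat x hx
  show (pvChain (-s) spot _).reverse ++ [spot] ++ pvChain s spot _ = _
  rw [habove, hbelow]
  obtain ⟨n, hUs⟩ := pvWalk_shape (fun loc => mQ (loc + s)) s fuel spot
  obtain ⟨m, hDs⟩ := pvWalk_shape (fun loc => mQ (loc + -s)) (-s) fuel spot
  rw [← hU] at hUs
  rw [← hD] at hDs
  have hUmem : ∀ b ∈ U, spot < b := by
    intro b hb
    rw [hUs] at hb
    obtain ⟨k, _, rfl⟩ := List.mem_map.mp hb
    have : (0:Int) < s * ((k:Int) + 1) := mul_pos hs (by positivity)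
    linarith
  have hDmem : ∀ a ∈ D, a < spot := by
    intro a ha
    rw [hDs] at ha
    obtain ⟨k, _, rfl⟩ := List.mem_map.mp ha
    have : (0:Int) < s * ((k:Int) + 1) := mul_pos hs (by positivity)
    linarith
  have hUpw : List.Pairwise (· < ·) U := by
    rw [hUs]
    apply List.pairwise_map.mpr
    apply List.pairwise_lt_range.imp
    intro a b hab
    have h1 : ((a:Int) + 1) < ((b:Int) + 1) := by exact_mod_cast Nat.succ_lt_succ hab
    have := mul_lt_mul_of_pos_left h1 hs
    linarith
  have hDpw : List.Pairwise (· > ·) D := by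
    rw [hDs]
    apply List.pairwise_map.mpr
    apply List.pairwise_lt_range.imp
    intro a b hab
    have h1 : ((a:Int) + 1) < ((b:Int) + 1) := by exact_mod_cast Nat.succ_lt_succ hab
    have := mul_lt_mul_of_pos_left h1 hs
    simp only [gt_iff_lt]
    linarith
  apply Eq.symm
  apply PySem.List.sorted_eq_of_perm_of_pairwise_lt
  · have p1 : (D.reverse ++ [spot] ++ U).Perm (D ++ ([spot] ++ U)) := by
      rw [List.append_assoc]
      exact (D.reverse_perm).append_right _
    have p2 : (D ++ ([spot] ++ U)).Perm (([spot] ++ U) ++ D) := List.perm_append_comm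
    have p3 : ([spot] ++ U) ++ D = spot :: (U ++ D) := by simp
    exact p1.trans (p2.trans (by rw [p3]))
  · rw [List.append_assoc]
    apply List.pairwise_append.mpr
    refine ⟨List.pairwise_reverse.mpr ?_, ?_, ?_⟩
    · exact hDpw.imp (fun h => h)
    · apply List.pairwise_cons.mpr
      exact ⟨fun b hb => hUmem b hb, hUpw⟩
    · intro a ha b hb
      have haD : a < spot := hDmem a (List.mem_reverse.mp ha)
      rcases List.mem_cons.mp hb with rfl | hbU
      · exact haD
      · exact lt_trans haD (hUmem _ hbU)


lemma pvAxisCombo_vert (spot : Int) (pool : List Int) (memF : Int → Bool)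
    (hmemF : ∀ y, memF y = decide (y ∈ pool))
    (fuel : Nat) (hfuel : pool.length < fuel) :
    pvAxisCombo spot (pvAxisCells spot pool false) 15 =
      PySem.List.sorted (spot :: (pvWalk (fun loc => memF (loc + 15)) 15 spot fuel ++
        pvWalk (fun loc => memF (loc - 15)) (-15) spot fuel)) (fun x => x) := by
  have hpres : pvAxisCells spot pool false =
      PySem.Set.ofList (pool.filter (fun x => PySem.Int.mod (x - spot) 15 == 0)) := by
    simp [pvAxisCells]
  rw [hpres]
  set present : List Int := PySem.Set.ofList (pool.filter (fun x => PySem.Int.mod (x - spot) 15 == 0)) with hP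
  set mQ : Int → Bool := fun x => decide (x ∈ present) with hmQ
  have hmemP : ∀ x, x ∈ present ↔ (x ∈ pool ∧ (15:Int) ∣ (x - spot)) := by
    intro x
    rw [hP, PySem.Set.mem_ofList, List.mem_filter]
    simp
  have h1 := pvAxisCombo_eq_sorted mQ present spot 15 (by norm_num)
    (by rw [hP]; exact PySem.Set.nodup_ofList _)
    (fun x => by simp [hmQ])
    (fun x hx => ((hmemP x).mp (by simpa [hmQ] using hx)).2)
    fuel
    (by
      rw [hP]
      calc (PySem.Set.ofList (pool.filter (fun x => PySem.Int.mod (x - spot) 15 == 0))).length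
          ≤ (pool.filter (fun x => PySem.Int.mod (x - spot) 15 == 0)).length := PySem.Set.length_ofList_le _
        _ ≤ pool.length := List.length_filter_le _ _
        _ < fuel := hfuel)
  rw [h1]
  have hup : pvWalk (fun loc => memF (loc + 15)) 15 spot fuel = pvWalk (fun loc => mQ (loc + 15)) 15 spot fuel := by
    apply pvWalk_congr_inv _ _ _ (fun loc => (15:Int) ∣ (loc - spot)) _ _ fuel spot (by simp)
    · intro loc hInv _
      have : loc + 15 - spot = (loc - spot) + 15 := by ring
      rw [this]
      exact dvd_add hInv (by norm_num)
    · intro loc hInv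
      rw [hmemF, hmQ]
      simp only [decide_eq_decide]
      rw [hmemP]
      have : loc + 15 - spot = (loc - spot) + 15 := by ring
      constructor
      · intro h; exact ⟨h, by rw [this]; exact dvd_add hInv (by norm_num)⟩
      · intro h; exact h.1
  have hdn : pvWalk (fun loc => memF (loc - 15)) (-15) spot fuel = pvWalk (fun loc => mQ (loc + -15)) (-15) spot fuel := by
    apply pvWalk_congr_inv _ _ _ (fun loc => (15:Int) ∣ (loc - spot)) _ _ fuel spot (by simp)
    · intro loc hInv _
      have : loc + -15 - spot = (loc - spot) + -15 := by ring
      rw [this]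
      exact dvd_add hInv (by norm_num)
    · intro loc hInv
      rw [hmemF, hmQ]
      have hls : loc - 15 = loc + -15 := by ring
      rw [hls]
      simp only [decide_eq_decide]
      rw [hmemP]
      have : loc + -15 - spot = (loc - spot) + -15 := by ring
      constructor
      · intro h; exact ⟨h, by rw [this]; exact dvd_add hInv (by norm_num)⟩
      · intro h; exact h.1
  rw [hup, hdn]

lemma pvAxisCombo_horiz (spot : Int) (pool : List Int) (memF : Int → Bool)
    (hmemF : ∀ y, memF y = decide (y ∈ pool))
    (fuel : Nat) (hfuel : pool.length < fuel) :
    pvAxisCombo spot (pvAxisCells spot pool true) 1 =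
      PySem.List.sorted (spot :: (pvWalk (fun loc => memF (loc + 1) && (PySem.Int.mod loc 15 != 14)) 1 spot fuel ++
        pvWalk (fun loc => memF (loc - 1) && (PySem.Int.mod loc 15 != 0)) (-1) spot fuel)) (fun x => x) := by
  have hpres : pvAxisCells spot pool true =
      PySem.Set.ofList (pool.filter (fun x => decide (PySem.Int.floordiv spot 15 * 15 ≤ x) && decide (x < PySem.Int.floordiv spot 15 * 15 + 15))) := by
    simp [pvAxisCells]
  set base : Int := PySem.Int.floordiv spot 15 * 15 with hbase
  have hsb : base ≤ spot ∧ spot < base + 15 := by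
    have h := (PySem.Int.floordiv_eq_iff_of_pos (show (0:Int) < 15 by norm_num)).mp
      (rfl : PySem.Int.floordiv spot 15 = PySem.Int.floordiv spot 15)
    constructor <;> [linarith [h.1]; linarith [h.2]]
  have hmod : ∀ loc : Int, base ≤ loc → loc < base + 15 → PySem.Int.mod loc 15 = loc - base := by
    intro loc h1 h2
    have hq : PySem.Int.floordiv loc 15 = PySem.Int.floordiv spot 15 := by
      rw [PySem.Int.floordiv_eq_iff_of_pos (show (0:Int) < 15 by norm_num)]
      constructor <;> linarith
    have := PySem.Int.floordiv_mul_add_mod loc 15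
    rw [hq] at this
    linarith
  rw [hpres]
  set present : List Int := PySem.Set.ofList (pool.filter (fun x => decide (base ≤ x) && decide (x < base + 15))) with hP
  set mQ : Int → Bool := fun x => decide (x ∈ present) with hmQ
  have hmemP : ∀ x, x ∈ present ↔ (x ∈ pool ∧ base ≤ x ∧ x < base + 15) := by
    intro x
    rw [hP, PySem.Set.mem_ofList, List.mem_filter]
    simp
  have h1 := pvAxisCombo_eq_sorted mQ present spot 1 (by norm_num)
    (by rw [hP]; exact PySem.Set.nodup_ofList _)
    (fun x => by simp [hmQ])
    (fun x _ => Int.one_dvd _)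
    fuel
    (by
      rw [hP]
      calc (PySem.Set.ofList (pool.filter (fun x => decide (base ≤ x) && decide (x < base + 15)))).length
          ≤ (pool.filter (fun x => decide (base ≤ x) && decide (x < base + 15))).length := PySem.Set.length_ofList_le _
        _ ≤ pool.length := List.length_filter_le _ _
        _ < fuel := hfuel)
  rw [h1]
  have hup : pvWalk (fun loc => memF (loc + 1) && (PySem.Int.mod loc 15 != 14)) 1 spot fuel =
      pvWalk (fun loc => mQ (loc + 1)) 1 spot fuel := by
    apply pvWalk_congr_inv _ _ _ (fun loc => base ≤ loc ∧ loc < base + 15) _ _ fuel spot ⟨hsb.1, hsb.2⟩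
    · intro loc hInv hc
      rw [hmod loc hInv.1 hInv.2] at hc
      simp only [Bool.and_eq_true, bne_iff_ne] at hc
      exact ⟨by omega, by omega⟩
    · intro loc hInv
      rw [hmemF, hmod loc hInv.1 hInv.2, hmQ]
      rw [Bool.eq_iff_iff]
      simp only [Bool.and_eq_true, decide_eq_true_eq, bne_iff_ne]
      rw [hmemP]
      constructor
      · rintro ⟨hM, hb⟩; exact ⟨hM, by omega, by omega⟩
      · rintro ⟨hM, hb1, hb2⟩; exact ⟨hM, by omega⟩
  have hdn : pvWalk (fun loc => memF (loc - 1) && (PySem.Int.mod loc 15 != 0)) (-1) spot fuel =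
      pvWalk (fun loc => mQ (loc + -1)) (-1) spot fuel := by
    apply pvWalk_congr_inv _ _ _ (fun loc => base ≤ loc ∧ loc < base + 15) _ _ fuel spot ⟨hsb.1, hsb.2⟩
    · intro loc hInv hc
      rw [hmod loc hInv.1 hInv.2] at hc
      simp only [Bool.and_eq_true, bne_iff_ne] at hc
      exact ⟨by omega, by omega⟩
    · intro loc hInv
      rw [hmemF, hmod loc hInv.1 hInv.2, hmQ]
      rw [Bool.eq_iff_iff]
      simp only [Bool.and_eq_true, decide_eq_true_eq, bne_iff_ne]
      rw [hmemP]
      have : loc - 1 = loc + -1 := by ring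
      rw [this]
      constructor
      · rintro ⟨hM, hb⟩; exact ⟨hM, by omega, by omega⟩
      · rintro ⟨hM, hb1, hb2⟩; exact ⟨hM, by omega⟩
  rw [hup, hdn]

lemma getMainCombo_eq (occupied situation : List Int) (isRowCombo : Bool) :
    getMainCombo isRowCombo occupied situation =
      pvAxisCombo (situation.headD 0)
        (pvAxisCells (situation.headD 0) ((PySem.Set.ofList occupied).union (PySem.Set.ofList situation)) isRowCombo)
        (if isRowCombo then 1 else 15) := by
  have hlen : ((PySem.Set.ofList occupied).union (PySem.Set.ofList situation)).length <
      occupied.length + situation.length + 1 := by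
    have h1 := pvLen_foldl_add (PySem.Set.ofList situation) (PySem.Set.ofList occupied)
    have h2 := PySem.Set.length_ofList_le occupied
    have h3 := PySem.Set.length_ofList_le situation
    have hu : (PySem.Set.ofList occupied).union (PySem.Set.ofList situation) =
        List.foldl PySem.Set.add (PySem.Set.ofList occupied) (PySem.Set.ofList situation) := rfl
    rw [hu]
    omega
  have hmemF : ∀ y : Int, (decide (y ∈ occupied) || decide (y ∈ situation)) =
      decide (y ∈ (PySem.Set.ofList occupied).union (PySem.Set.ofList situation)) := by
    intro y
    rw [Bool.eq_iff_iff]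
    simp [PySem.Set.mem_union, PySem.Set.mem_ofList]
  cases isRowCombo
  · exact (pvAxisCombo_vert (situation.headD 0)
      ((PySem.Set.ofList occupied).union (PySem.Set.ofList situation))
      (fun y => decide (y ∈ occupied) || decide (y ∈ situation)) hmemF
      (occupied.length + situation.length + 1) hlen).symm
  · exact (pvAxisCombo_horiz (situation.headD 0)
      ((PySem.Set.ofList occupied).union (PySem.Set.ofList situation))
      (fun y => decide (y ∈ occupied) || decide (y ∈ situation)) hmemF
      (occupied.length + situation.length + 1) hlen).symm

lemma getSideCombo_eq (spot : Int) (occupied : List Int) (isRowCombo : Bool) :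
    getSideCombo isRowCombo spot occupied =
      pvAxisCombo spot (pvAxisCells spot (PySem.Set.ofList occupied) (!isRowCombo))
        (if isRowCombo then 15 else 1) := by
  have hlen : (PySem.Set.ofList occupied : List Int).length < occupied.length + 1 := by
    have := PySem.Set.length_ofList_le occupied
    omega
  have hmemF : ∀ y : Int, (decide (y ∈ occupied)) = decide (y ∈ (PySem.Set.ofList occupied : List Int)) := by
    intro y
    rw [Bool.eq_iff_iff]
    simp [PySem.Set.mem_ofList]
  cases isRowCombo
  · exact (pvAxisCombo_horiz spot (PySem.Set.ofList occupied)
      (fun y => decide (y ∈ occupied)) hmemF (occupied.length + 1) hlen).symm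
  · exact (pvAxisCombo_vert spot (PySem.Set.ofList occupied)
      (fun y => decide (y ∈ occupied)) hmemF (occupied.length + 1) hlen).symm


lemma letterUpDown_eq (spot : Int) (occupied : List Int) :
    letterUpDown spot occupied = pvHasNeighbor spot (PySem.Set.ofList occupied) true := by
  simp only [letterUpDown, pvHasNeighbor, if_true]
  split_ifs with h1 h2 <;> simp_all [PySem.Set.mem_ofList]

lemma letterLeftRight_eq (spot : Int) (occupied : List Int) :
    letterLeftRight spot occupied = pvHasNeighbor spot (PySem.Set.ofList occupied) false := by
  simp only [letterLeftRight, pvHasNeighbor]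
  split_ifs with h1 h2 <;> simp_all [PySem.Set.mem_ofList]

-- ===== VERDICT (by name: the statement is the Claim_ definition above) =====
theorem getAllCombos_spec : Claim_equal_getAllCombos := by
  unfold Claim_equal_getAllCombos
  intro situation occupied isRowCombo _ _
  unfold Spec_getAllCombos getAllCombos getAllCombos_alt
  rw [getMainCombo_eq]
  cases isRowCombo
  · simp [letterLeftRight_eq, getSideCombo_eq]
  · simp [letterUpDown_eq, getSideCombo_eq]
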